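-- pv_equiv track=rewrite | github.com/0ptik41/ASCII | code/encoder.py | ind2sub
-- ===== SOURCE A (Python) =====
-- def ind2sub(dims):
--     subs = []
--     ii = 0
--     table = {}
--     for x in range(dims[0]):
--         for y in range(dims[1]):
--             table[ii] = [x, y]
--             ii +=1
--     return table
-- ===== SOURCE B (Python) =====
-- def ind2sub(dims):
--     return {i: list(divmod(i, dims[1])) for i in range(dims[0] * dims[1])}
-- ===== Notes on version B (the rewrite author's own statement) =====
-- stated objective: simpler
-- what changed: Replaces the nested row/column loops with a running counter by a single flat dict comprehension over range(rows*cols) computing each coordinate pair in closed form with divmod; Pre_ excludes lists shorter than two (where one of the programs raises IndexError) and grids with both dims negative, a nonsense input on which A's empty dict and B's divmod table are both accidental.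
-- outside the precondition, e.g. on ind2sub([-1]): A returns {}, B raises IndexError; on ind2sub([0]): A returns {}, B raises IndexError
import Mathlib
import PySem

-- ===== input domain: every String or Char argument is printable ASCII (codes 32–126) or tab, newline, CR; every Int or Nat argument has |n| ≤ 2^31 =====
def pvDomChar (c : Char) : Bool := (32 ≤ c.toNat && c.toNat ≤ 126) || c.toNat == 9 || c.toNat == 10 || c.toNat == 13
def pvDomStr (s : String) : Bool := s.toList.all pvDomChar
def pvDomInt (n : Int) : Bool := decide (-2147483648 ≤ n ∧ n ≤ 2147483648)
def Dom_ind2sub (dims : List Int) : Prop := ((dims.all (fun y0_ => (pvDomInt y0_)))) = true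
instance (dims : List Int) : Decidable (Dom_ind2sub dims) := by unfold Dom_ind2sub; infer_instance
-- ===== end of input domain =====

-- B replaces A's nested loops + running counter by one flat pass with divmod; objective: simpler.

-- ===== PORT A =====
-- literal transliteration of A: nested for-loops over range of rows × range of cols,
-- state = (ii, table); the unused 'subs = []' is dropped; the dict is returned as its items list.
def ind2sub (dims : List Int) : List (Int × List Int) :=
  (((PySem.List.pyRange 0 (PySem.List.pyGetD dims 0 0) 1).foldl
      (fun (st : Int × PySem.Dict Int (List Int)) x =>
        (PySem.List.pyRange 0 (PySem.List.pyGetD dims 1 0) 1).foldl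
          (fun st y => (st.1 + 1, st.2.insert st.1 [x, y])) st)
      (0, PySem.Dict.empty)).2).items

-- ===== PORT B =====
-- literal transliteration of B: a dict comprehension over the flat range of rows*cols with divmod.
def ind2sub_alt (dims : List Int) : List (Int × List Int) :=
  (((PySem.List.pyRange 0 (PySem.List.pyGetD dims 0 0 * PySem.List.pyGetD dims 1 0) 1).foldl
      (fun (d : PySem.Dict Int (List Int)) i =>
        d.insert i [PySem.Int.floordiv i (PySem.List.pyGetD dims 1 0),
                    PySem.Int.mod i (PySem.List.pyGetD dims 1 0)])
      PySem.Dict.empty)).items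

-- ===== PRECONDITION & SPEC =====
-- Pre_ excludes lists shorter than two (A raises IndexError there unless dims[0] ≤ 0, in which
-- case B raises instead) and grids with both dims negative, a nonsense input on which A's empty
-- dict and B's divmod table are equally accidental.
def Pre_ind2sub (dims : List Int) : Prop :=
  2 ≤ dims.length ∧ ¬(dims.headI < 0 ∧ dims.tail.headI < 0)
instance (dims : List Int) : Decidable (Pre_ind2sub dims) := by unfold Pre_ind2sub; infer_instance
def pvWitness_ind2sub : List Int := [2, 3]
def Spec_ind2sub (dims : List Int) (out : List (Int × List Int)) : Prop := out = ind2sub_alt dims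
instance (dims : List Int) (out : List (Int × List Int)) : Decidable (Spec_ind2sub dims out) := by unfold Spec_ind2sub; infer_instance

-- ===== CLAIM (what is proved, stated in full; the proofs are below) =====
def Claim_equal_ind2sub : Prop := ∀ (dims : List Int), Dom_ind2sub dims → Pre_ind2sub dims → Spec_ind2sub dims (ind2sub dims)

-- ===== LEMMAS AND PROOFS =====

-- the inner y-loop of A, over range(m), starting from counter c and dict d
lemma ind2sub_inner (m : Nat) (x c : Int) (d : PySem.Dict Int (List Int)) :
    (List.range m).foldl
        (fun (st : Int × PySem.Dict Int (List Int)) (y : Nat) => (st.1 + 1, st.2.insert st.1 [x, (y : Int)])) (c, d)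
      = (c + m, (List.range m).foldl (fun (d' : PySem.Dict Int (List Int)) (y : Nat) => d'.insert (c + y) [x, (y : Int)]) d) := by
  induction m generalizing c d with
  | zero => simp
  | succ k ih =>
      rw [List.range_succ, List.foldl_append, List.foldl_append, ih]
      simp only [List.foldl_cons, List.foldl_nil]
      refine Prod.ext ?_ ?_
      · push_cast; ring
      · rfl

-- A's whole nested loop, for positive width m, equals the flat divmod loop of B
lemma ind2sub_flat (m : Nat) (hm : 0 < m) : ∀ (n : Nat),
    ((List.range n).foldl
        (fun (st : Int × PySem.Dict Int (List Int)) (x : Nat) =>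
          (List.range m).foldl
            (fun st (y : Nat) => (st.1 + 1, st.2.insert st.1 [(x : Int), (y : Int)])) st)
        (0, PySem.Dict.empty))
      = (((n * m : Nat) : Int),
         (List.range (n * m)).foldl
           (fun (d : PySem.Dict Int (List Int)) (i : Nat) => d.insert ((i : Nat) : Int) [((i / m : Nat) : Int), ((i % m : Nat) : Int)])
           PySem.Dict.empty) := by
  intro n
  induction n with
  | zero => simp
  | succ k ih =>
      rw [List.range_succ, List.foldl_append, ih]
      simp only [List.foldl_cons, List.foldl_nil]
      rw [ind2sub_inner]
      have hsplit : (k + 1) * m = k * m + m := by ring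
      rw [hsplit, List.range_add, List.foldl_append, List.foldl_map]
      refine Prod.ext ?_ ?_
      · push_cast; ring
      · apply PySem.List.foldl_congr_mem
        intro acc y hy
        have hy2 : y < m := List.mem_range.mp hy
        have h1 : (k * m + y) / m = k := by
          rw [Nat.add_comm, Nat.add_mul_div_right _ _ hm, Nat.div_eq_of_lt hy2]; omega
        have h2 : (k * m + y) % m = y := by
          rw [Nat.add_comm, Nat.add_mul_mod_self_right, Nat.mod_eq_of_lt hy2]
        rw [h1, h2]
        push_cast
        rfl

theorem ind2sub_spec_aux (dims : List Int) (hpre : Pre_ind2sub dims) :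
    ind2sub dims = ind2sub_alt dims := by
  obtain ⟨hlen, hnn⟩ := hpre
  obtain ⟨a, b, rest, rfl⟩ : ∃ a b rest, dims = a :: b :: rest := by
    match dims, hlen with
    | x :: y :: r, _ => exact ⟨x, y, r, rfl⟩
  simp only [List.headI, List.tail] at hnn
  have ha : PySem.List.pyGetD (a :: b :: rest) 0 0 = a := by
    simp [PySem.List.pyGetD, PySem.List.pyGet?, PySem.List.pyIdx?]
    rw [if_pos (by positivity)]
    simp
  have hb : PySem.List.pyGetD (a :: b :: rest) 1 0 = b := by
    simp [PySem.List.pyGetD, PySem.List.pyGet?, PySem.List.pyIdx?]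
  by_cases h0 : a ≤ 0
  · -- outer range of A empty; B's flat range empty since a*b ≤ 0 (b ≥ 0 when a < 0, by Pre_)
    have hab : a * b ≤ 0 := by
      rcases lt_or_eq_of_le h0 with h | h
      · have hbpos : 0 ≤ b := by by_contra hc; exact hnn ⟨h, by omega⟩
        exact mul_nonpos_of_nonpos_of_nonneg h0 hbpos
      · simp [h]
    unfold ind2sub ind2sub_alt
    rw [ha, hb, PySem.List.pyRange_one_eq_nil h0, PySem.List.pyRange_one_eq_nil hab]
    simp [PySem.Dict.empty]
  · push Not at h0
    by_cases h1 : b ≤ 0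
    · -- inner ranges empty; B's flat range empty since a*b ≤ 0
      unfold ind2sub ind2sub_alt
      rw [ha, hb,
          PySem.List.pyRange_one_eq_nil (a := 0) (b := a * b) (mul_nonpos_of_nonneg_of_nonpos (by omega) h1)]
      rw [PySem.List.pyRange_one_eq_nil (a := 0) (b := b) h1]
      simp [List.foldl_fixed, PySem.Dict.empty]
    · push Not at h1
      -- both are the canonical flat foldl
      obtain ⟨n, hn⟩ : ∃ n : Nat, a = (n : Int) := ⟨a.toNat, (Int.toNat_of_nonneg h0.le).symm⟩
      obtain ⟨m, hm⟩ : ∃ m : Nat, b = (m : Int) := ⟨b.toNat, (Int.toNat_of_nonneg h1.le).symm⟩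
      have hmpos : 0 < m := by omega
      unfold ind2sub ind2sub_alt
      rw [ha, hb, hn, hm,
          show ((n : Int) * (m : Int)) = ((n * m : Nat) : Int) by push_cast; ring]
      simp only [PySem.List.pyRange_zero_natCast, List.foldl_map]
      rw [ind2sub_flat m hmpos n]
      congr 1
      apply PySem.List.foldl_congr_mem
      intro acc i hi
      congr 1
      rw [PySem.Int.floordiv_natCast, PySem.Int.mod_natCast]

-- ===== VERDICT (by name: the statement is the Claim_ definition above) =====
theorem ind2sub_spec : Claim_equal_ind2sub := by
  intro dims _ hpre
  exact ind2sub_spec_aux dims hpre
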